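-- pv_equiv track=rewrite | github.com/waggle-sensor/imsearch_benchmarks | CloudBenchMaker/tools/ccsn_meta.py | get_cloud_category
-- ===== SOURCE A (Python) =====
-- CATEGORY_MAPPING = {
--     "Ci": "cirrus",
--     "Cs": "cirrostratus",
--     "Cc": "cirrocumulus",
--     "Ac": "altocumulus",
--     "As": "altostratus",
--     "Cu": "cumulus",
--     "Cb": "cumulonimbus",
--     "Ns": "nimbostratus",
--     "Sc": "stratocumulus",
--     "St": "stratus",
--     "Ct": "contrail"
-- }
--
-- def get_cloud_category(folder_name):
--     """
--     Map folder name to cloud category.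
--
--     Args:
--         folder_name: Name of the folder containing images
--
--     Returns:
--         Full cloud category name, or None if not found
--     """
--     # Try exact match first
--     if folder_name in CATEGORY_MAPPING:
--         return CATEGORY_MAPPING[folder_name]
--
--     # Try case-insensitive match
--     folder_name_lower = folder_name.lower()
--     for key, value in CATEGORY_MAPPING.items():
--         if key.lower() == folder_name_lower:
--             return value
--
--     # Try partial match (e.g., "Ci_001" -> "cirrus")
--     for key, value in CATEGORY_MAPPING.items():
--         if folder_name_lower.startswith(key.lower()):
--             return value
--
--     return None
-- ===== SOURCE B (Python) =====
-- CATEGORY_MAPPING = {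
--     "Ci": "cirrus",
--     "Cs": "cirrostratus",
--     "Cc": "cirrocumulus",
--     "Ac": "altocumulus",
--     "As": "altostratus",
--     "Cu": "cumulus",
--     "Cb": "cumulonimbus",
--     "Ns": "nimbostratus",
--     "Sc": "stratocumulus",
--     "St": "stratus",
--     "Ct": "contrail"
-- }
--
-- LOWER_MAPPING = {k.lower(): v for k, v in CATEGORY_MAPPING.items()}
--
-- def get_cloud_category(folder_name):
--     """Map folder name to cloud category via one lowercase-prefix lookup."""
--     return LOWER_MAPPING.get(folder_name.lower()[:2])
-- ===== Notes on version B (the rewrite author's own statement) =====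
-- stated objective: simpler
-- what changed: Replaces A's three sequential scans of the mapping (exact match, case-insensitive loop, prefix loop) with a single lookup of the lowercased two-character prefix in a precomputed lowercase-keyed dict, relying on every key being exactly two characters.
import Mathlib
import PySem

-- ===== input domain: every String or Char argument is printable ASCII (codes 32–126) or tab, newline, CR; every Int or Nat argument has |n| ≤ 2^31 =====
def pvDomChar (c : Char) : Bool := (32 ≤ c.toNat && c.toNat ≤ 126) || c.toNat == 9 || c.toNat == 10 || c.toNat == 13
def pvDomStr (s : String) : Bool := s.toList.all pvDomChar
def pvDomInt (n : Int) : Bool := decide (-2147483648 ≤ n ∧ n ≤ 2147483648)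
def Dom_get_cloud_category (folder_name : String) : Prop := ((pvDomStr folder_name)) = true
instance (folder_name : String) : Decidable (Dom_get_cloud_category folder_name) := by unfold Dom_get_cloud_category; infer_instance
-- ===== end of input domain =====

-- B replaces A's three sequential scans of the mapping with a single lowercase-prefix dict lookup (simpler).

-- ===== PORT A =====
def CATEGORY_MAPPING : PySem.Dict String String :=
  PySem.Dict.mk [("Ci", "cirrus"), ("Cs", "cirrostratus"), ("Cc", "cirrocumulus"),
    ("Ac", "altocumulus"), ("As", "altostratus"), ("Cu", "cumulus"), ("Cb", "cumulonimbus"),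
    ("Ns", "nimbostratus"), ("Sc", "stratocumulus"), ("St", "stratus"), ("Ct", "contrail")]

-- 'for key, value in CATEGORY_MAPPING.items(): if key.lower() == folder_name_lower: return value'
def pvLowerLoop (fl : String) : List (String × String) → Option String
  | [] => none
  | (k, v) :: rest => if PySem.Str.lower k == fl then some v else pvLowerLoop fl rest

-- 'for key, value in CATEGORY_MAPPING.items(): if folder_name_lower.startswith(key.lower()): return value'
def pvPrefixLoop (fl : String) : List (String × String) → Option String
  | [] => none
  | (k, v) :: rest => if PySem.Str.startswith fl (PySem.Str.lower k) then some v else pvPrefixLoop fl rest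

def get_cloud_category (folder_name : String) : Option String :=
  -- 'if folder_name in CATEGORY_MAPPING: return CATEGORY_MAPPING[folder_name]', then the two loops in order
  (CATEGORY_MAPPING.get? folder_name).orElse (fun _ =>
    (pvLowerLoop (PySem.Str.lower folder_name) CATEGORY_MAPPING.items).orElse (fun _ =>
      pvPrefixLoop (PySem.Str.lower folder_name) CATEGORY_MAPPING.items))

-- ===== PORT B =====
-- LOWER_MAPPING = {k.lower(): v for k, v in CATEGORY_MAPPING.items()}
def LOWER_MAPPING : PySem.Dict String String :=
  PySem.Dict.ofList (CATEGORY_MAPPING.items.map (fun kv => (PySem.Str.lower kv.1, kv.2)))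

-- return LOWER_MAPPING.get(folder_name.lower()[:2])
def get_cloud_category_alt (folder_name : String) : Option String :=
  LOWER_MAPPING.get? (PySem.Str.slice (PySem.Str.lower folder_name) none (some 2))

-- ===== PRECONDITION & SPEC =====
def Spec_get_cloud_category (folder_name : String) (out : Option String) : Prop := out = get_cloud_category_alt folder_name
instance (folder_name : String) (out : Option String) : Decidable (Spec_get_cloud_category folder_name out) := by unfold Spec_get_cloud_category; infer_instance

-- ===== CLAIM (what is proved, stated in full; the proofs are below) =====
def Claim_equal_get_cloud_category : Prop := ∀ (folder_name : String), Dom_get_cloud_category folder_name → Spec_get_cloud_category folder_name (get_cloud_category folder_name)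


-- ===== LEMMAS AND PROOFS =====

-- ===== LEMMAS AND PROOFS =====

-- a two-character prefix test is the same as equality of the first two characters
theorem pvSliceOfSw (t p : String) (hp : p.toList.length = 2)
    (h : PySem.Str.startswith t p = true) : PySem.Str.slice t none (some 2) = p := by
  have hpre : p.toList <+: t.toList := (PySem.Chars.startswith_iff _ _).mp (by simpa using h)
  have ht : t.toList.take 2 = p.toList := by
    have h2 := List.prefix_iff_eq_take.mp hpre
    rw [hp] at h2; exact h2.symm
  apply String.toList_injective
  simpa [PySem.List.slice_to] using ht

theorem pvSwOfSlice (t p : String) (h : PySem.Str.slice t none (some 2) = p) :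
    PySem.Str.startswith t p = true := by
  apply (PySem.Chars.startswith_iff _ _).mpr
  have hp : p.toList = t.toList.take 2 := by
    rw [← h]; simp [PySem.List.slice_to]
  rw [hp]; exact List.take_prefix 2 t.toList

theorem pvCondFalse (t p : String) (h : ¬ PySem.Str.startswith t p = true) :
    (p == PySem.Str.slice t none (some 2)) = false := by
  apply beq_eq_false_iff_ne.mpr
  intro he
  exact h (pvSwOfSlice t p he.symm)

theorem pvLowConcrete : LOWER_MAPPING = PySem.Dict.mk [(PySem.Str.lower "Ci", "cirrus"), (PySem.Str.lower "Cs", "cirrostratus"), (PySem.Str.lower "Cc", "cirrocumulus"), (PySem.Str.lower "Ac", "altocumulus"), (PySem.Str.lower "As", "altostratus"), (PySem.Str.lower "Cu", "cumulus"), (PySem.Str.lower "Cb", "cumulonimbus"), (PySem.Str.lower "Ns", "nimbostratus"), (PySem.Str.lower "Sc", "stratocumulus"), (PySem.Str.lower "St", "stratus"), (PySem.Str.lower "Ct", "contrail")] := by decide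

theorem pvExactSome (s : String) (v : String) (h : CATEGORY_MAPPING.get? s = some v) :
    get_cloud_category_alt s = some v := by
  simp only [CATEGORY_MAPPING, PySem.Dict.get?_mk_cons] at h
  repeat' split at h
  all_goals first
    | (rename_i hc
       obtain rfl := eq_of_beq hc
       simp only [Option.some.injEq] at h
       subst h
       decide)
    | exact absurd h (by simp [PySem.Dict.get?])

theorem pvLowerSome (s : String) (v : String)
    (h : pvLowerLoop (PySem.Str.lower s) CATEGORY_MAPPING.items = some v) :
    get_cloud_category_alt s = some v := by
  simp only [CATEGORY_MAPPING, pvLowerLoop] at h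
  repeat' split at h
  all_goals first
    | (rename_i hc
       have hk := eq_of_beq hc
       simp only [Option.some.injEq] at h
       subst h
       simp only [get_cloud_category_alt]
       rw [← hk]
       decide)
    | exact absurd h (by simp)

theorem pvPrefixEq (s : String) :
    pvPrefixLoop (PySem.Str.lower s) CATEGORY_MAPPING.items = get_cloud_category_alt s := by
  simp only [CATEGORY_MAPPING, pvPrefixLoop]
  repeat' split
  all_goals try (rename_i hc
                 simp only [get_cloud_category_alt]
                 rw [pvSliceOfSw _ _ (by decide) hc]
                 decide)
  rename_i g1 g2 g3 g4 g5 g6 g7 g8 g9 g10 g11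
  simp only [get_cloud_category_alt, pvLowConcrete, PySem.Dict.get?_mk_cons]
  simp [pvCondFalse _ _ g1, pvCondFalse _ _ g2, pvCondFalse _ _ g3, pvCondFalse _ _ g4, pvCondFalse _ _ g5, pvCondFalse _ _ g6, pvCondFalse _ _ g7, pvCondFalse _ _ g8, pvCondFalse _ _ g9, pvCondFalse _ _ g10, pvCondFalse _ _ g11, PySem.Dict.get?]

theorem main_eq (s : String) : get_cloud_category s = get_cloud_category_alt s := by
  unfold get_cloud_category
  cases hE : CATEGORY_MAPPING.get? s with
  | some v => rw [Option.orElse_some]; exact (pvExactSome s v hE).symm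
  | none =>
    rw [Option.orElse_none]
    cases hL : pvLowerLoop (PySem.Str.lower s) CATEGORY_MAPPING.items with
    | some v => rw [Option.orElse_some]; exact (pvLowerSome s v hL).symm
    | none => rw [Option.orElse_none]; exact pvPrefixEq s


-- ===== VERDICT (by name: the statement is the Claim_ definition above) =====
theorem get_cloud_category_spec : Claim_equal_get_cloud_category := by
  intro s _
  exact main_eq s
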